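-- pv_equiv track=rewrite | github.com/Ainul-550Islam/earning-backend-C | api/offer_inventory/compliance_legal/tos_version_control.py | get_version_diff
-- ===== SOURCE A (Python) =====
-- TOS_CHANGELOG = [
--     {
--         'version': '3.0',
--         'date'   : '2025-01-01',
--         'changes': [
--             'GDPR compliance update — data export and erasure rights',
--             'Referral terms updated — commission structure clarified',
--             'AML policy added — withdrawal monitoring',
--             'Bangladesh-specific withdrawal terms',
--         ],
--     },
--     {
--         'version': '2.5',
--         'date'   : '2024-07-01',
--         'changes': [
--             'Bangladesh-specific legal terms added',
--             'AML policy update for large withdrawals',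
--             'KYC requirements for withdrawals above ৳500',
--         ],
--     },
--     {
--         'version': '2.0',
--         'date'   : '2024-01-01',
--         'changes': [
--             'Multi-tenant terms of service',
--             'KYC requirements introduced',
--             'Fraud policy expanded',
--         ],
--     },
--     {
--         'version': '1.0',
--         'date'   : '2023-06-01',
--         'changes': ['Initial Terms of Service'],
--     },
-- ]
--
-- def get_version_diff(from_version: str, to_version: str) -> list:
--     """Get changes between two TOS versions."""
--     changes = []
--     collecting = False
--     for entry in TOS_CHANGELOG:
--         if entry['version'] == to_version:
--             collecting = True
--         if collecting:
--             changes.extend(entry['changes'])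
--         if entry['version'] == from_version:
--             break
--     return changes
-- ===== SOURCE B (Python) =====
-- TOS_CHANGELOG = [
--     {
--         'version': '3.0',
--         'date'   : '2025-01-01',
--         'changes': [
--             'GDPR compliance update — data export and erasure rights',
--             'Referral terms updated — commission structure clarified',
--             'AML policy added — withdrawal monitoring',
--             'Bangladesh-specific withdrawal terms',
--         ],
--     },
--     {
--         'version': '2.5',
--         'date'   : '2024-07-01',
--         'changes': [
--             'Bangladesh-specific legal terms added',
--             'AML policy update for large withdrawals',
--             'KYC requirements for withdrawals above ৳500',
--         ],
--     },
--     {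
--         'version': '2.0',
--         'date'   : '2024-01-01',
--         'changes': [
--             'Multi-tenant terms of service',
--             'KYC requirements introduced',
--             'Fraud policy expanded',
--         ],
--     },
--     {
--         'version': '1.0',
--         'date'   : '2023-06-01',
--         'changes': ['Initial Terms of Service'],
--     },
-- ]
--
-- def get_version_diff(from_version: str, to_version: str) -> list:
--     """Get changes between two TOS versions (index + slice, no stateful scan)."""
--     versions = [e['version'] for e in TOS_CHANGELOG]
--     try:
--         pos_to = versions.index(to_version)
--     except ValueError:
--         return []
--     try:
--         pos_from = versions.index(from_version)
--     except ValueError: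
--         segment = TOS_CHANGELOG[pos_to:]
--     else:
--         if pos_from < pos_to:
--             return []
--         segment = TOS_CHANGELOG[pos_to:pos_from + 1]
--     out = []
--     for e in segment:
--         out.extend(e['changes'])
--     return out
-- ===== Notes on version B (the rewrite author's own statement) =====
-- stated objective: alternative
-- what changed: Replaces A's single stateful scan with a 'collecting' flag and break by locating the indices of to_version and from_version, then flattening one contiguous slice of the changelog (empty when to_version is absent or from_version precedes to_version).
import Mathlib
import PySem

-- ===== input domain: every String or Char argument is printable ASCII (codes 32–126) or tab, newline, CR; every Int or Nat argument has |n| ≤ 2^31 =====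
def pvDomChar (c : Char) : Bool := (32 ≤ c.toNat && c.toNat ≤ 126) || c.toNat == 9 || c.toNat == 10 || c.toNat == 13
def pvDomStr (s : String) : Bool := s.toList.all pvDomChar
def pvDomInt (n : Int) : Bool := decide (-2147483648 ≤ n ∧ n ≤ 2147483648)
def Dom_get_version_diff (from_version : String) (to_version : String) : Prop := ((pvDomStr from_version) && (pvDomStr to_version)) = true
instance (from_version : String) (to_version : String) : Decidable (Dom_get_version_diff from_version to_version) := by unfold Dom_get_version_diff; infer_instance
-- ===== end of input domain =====

-- B replaces A's stateful collect/break scan by locating the two version indices and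
-- flattening one contiguous slice of the changelog (objective: alternative decomposition).

-- the module constant TOS_CHANGELOG, as (version, changes) pairs ('date' is never read)
def pvChangelog : List (String × List String) :=
  [("3.0", ["GDPR compliance update — data export and erasure rights",
            "Referral terms updated — commission structure clarified",
            "AML policy added — withdrawal monitoring",
            "Bangladesh-specific withdrawal terms"]),
   ("2.5", ["Bangladesh-specific legal terms added",
            "AML policy update for large withdrawals",
            "KYC requirements for withdrawals above ৳500"]),
   ("2.0", ["Multi-tenant terms of service",
            "KYC requirements introduced",
            "Fraud policy expanded"]),
   ("1.0", ["Initial Terms of Service"])]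

-- ===== PORT A =====
-- A's loop with `collecting` flag and `break`, as structural recursion over the changelog
def pvGoA (from_version to_version : String) :
    List (String × List String) → List String → Bool → List String
  | [], changes, _ => changes
  | (v, chs) :: rest, changes, collecting =>
    let collecting' := if v == to_version then true else collecting
    let changes' := if collecting' then changes ++ chs else changes
    if v == from_version then changes'
    else pvGoA from_version to_version rest changes' collecting'

def get_version_diff (from_version : String) (to_version : String) : List String :=
  pvGoA from_version to_version pvChangelog [] false

-- ===== PORT B =====
def get_version_diff_alt (from_version : String) (to_version : String) : List String :=
  match pvChangelog.findIdx? (fun e => e.1 == to_version) with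
  | none => []
  | some pos_to =>
    let segment : List (String × List String) :=
      match pvChangelog.findIdx? (fun e => e.1 == from_version) with
      | none => pvChangelog.drop pos_to
      | some pos_from =>
        if pos_from < pos_to then []
        else (pvChangelog.drop pos_to).take (pos_from - pos_to + 1)
    segment.flatMap (·.2)

-- ===== PRECONDITION & SPEC =====
def Spec_get_version_diff (from_version : String) (to_version : String) (out : List String) : Prop := out = get_version_diff_alt from_version to_version
instance (from_version : String) (to_version : String) (out : List String) : Decidable (Spec_get_version_diff from_version to_version out) := by unfold Spec_get_version_diff; infer_instance

-- ===== CLAIM (what is proved, stated in full; the proofs are below) =====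
def Claim_equal_get_version_diff : Prop := ∀ (from_version : String) (to_version : String), Dom_get_version_diff from_version to_version → Spec_get_version_diff from_version to_version (get_version_diff from_version to_version)

-- ===== LEMMAS AND PROOFS =====

-- ===== VERDICT (by name: the statement is the Claim_ definition above) =====
theorem get_version_diff_spec : Claim_equal_get_version_diff := by
  intro f t _
  unfold Spec_get_version_diff
  have ht : t = "3.0" ∨ t = "2.5" ∨ t = "2.0" ∨ t = "1.0" ∨
      (¬("3.0" = t) ∧ ¬("2.5" = t) ∧ ¬("2.0" = t) ∧ ¬("1.0" = t)) := by tauto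
  have hf : f = "3.0" ∨ f = "2.5" ∨ f = "2.0" ∨ f = "1.0" ∨
      (¬("3.0" = f) ∧ ¬("2.5" = f) ∧ ¬("2.0" = f) ∧ ¬("1.0" = f)) := by tauto
  rcases ht with rfl | rfl | rfl | rfl | ⟨t1, t2, t3, t4⟩ <;>
    rcases hf with rfl | rfl | rfl | rfl | ⟨f1, f2, f3, f4⟩ <;>
      simp_all [get_version_diff, get_version_diff_alt, pvGoA, pvChangelog,
        List.findIdx?_cons]
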